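-- pv_equiv track=rewrite | github.com/AP-MI-2021/lab-4-Romeliu | main.py | get_lista_palindroame
-- ===== SOURCE A (Python) =====
-- def is_palindrom(nr)->bool:
--     #verifica daca un numar este egal cu oglinditul sau
--     oglinda = oglindit(nr)
--     if nr == oglinda:
--         return True
--     else:
--         return False
--
-- def oglindit(nr)->int:
--     #returneaza oglinitul numarului primit ca parametru
--     oglinda = 0
--     while nr:
--         oglinda = oglinda * 10 + nr % 10
--         nr = nr // 10
--     return oglinda
--
-- def get_lista_palindroame(lista1, lista2):
--     lista_palindrom = []
--     pozitie = 0
--     while len(lista1) > pozitie and len(lista2) > pozitie: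
--         nr_str = str(lista1[pozitie]) + str(lista2[pozitie])
--         if is_palindrom(int(nr_str)):
--             lista_palindrom.append(int(nr_str))
--         pozitie += 1
--     return lista_palindrom
-- ===== SOURCE B (Python) =====
-- def get_lista_palindroame(lista1, lista2):
--     rezultat = []
--     for a, b in zip(lista1, lista2):
--         n = int(str(a) + str(b))
--         s = str(n)
--         if s == s[::-1]:
--             rezultat.append(n)
--     return rezultat
-- ===== Notes on version B (the rewrite author's own statement) =====
-- stated objective: simpler
-- what changed: Replaces the index-driven while loop and the digit-by-digit arithmetic reversal helpers (oglindit/is_palindrom) with a zip over the paired elements and a direct string palindrome test s == s[::-1] on str(n).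
import Mathlib
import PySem

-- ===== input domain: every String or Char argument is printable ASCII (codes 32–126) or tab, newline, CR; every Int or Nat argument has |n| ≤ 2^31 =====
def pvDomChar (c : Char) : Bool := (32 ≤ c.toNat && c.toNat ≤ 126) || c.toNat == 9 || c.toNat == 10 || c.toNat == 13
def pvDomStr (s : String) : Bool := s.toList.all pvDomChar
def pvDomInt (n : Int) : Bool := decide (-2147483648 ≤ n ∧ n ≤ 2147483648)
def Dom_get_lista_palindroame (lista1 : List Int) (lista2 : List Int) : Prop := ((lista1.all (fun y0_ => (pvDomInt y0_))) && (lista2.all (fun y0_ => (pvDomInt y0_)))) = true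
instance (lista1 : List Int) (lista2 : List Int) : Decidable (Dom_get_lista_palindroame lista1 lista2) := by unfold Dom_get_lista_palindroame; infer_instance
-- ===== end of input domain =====

-- B replaces A's index-driven while loop and its arithmetic digit-reversal helpers
-- (oglindit/is_palindrom) by a zip over the paired elements with a string palindrome test.

-- ===== PORT A =====
-- 'while nr: oglinda = oglinda*10 + nr%10; nr = nr//10'. Python's loop does not terminate for
-- nr < 0 (nr//10 stalls at -1); such nr never arise under Pre_, and the guard '0 < nr' (which
-- agrees with Python's 'nr != 0' test on every nr ≥ 0) makes the port total.
def oglindit_go : Nat → Int → Int → Int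
  | 0, _, oglinda => oglinda
  | fuel + 1, nr, oglinda =>
    if 0 < nr then
      oglindit_go fuel (PySem.Int.floordiv nr 10) (oglinda * 10 + PySem.Int.mod nr 10)
    else oglinda

-- fuel nr.toNat + 1 bounds the iteration count (each step divides nr by 10)
def oglindit (nr : Int) : Int := oglindit_go (nr.toNat + 1) nr 0

def is_palindrom (nr : Int) : Bool :=
  if nr = oglindit nr then true else false

-- the while loop of get_lista_palindroame; 'str(...) + str(...)' and 'int(...)' are ported on the
-- character side (PySem.Int.toChars / PySem.Int.ofChars?, exact per PYSEM.md). ofChars? = none is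
-- Python's ValueError from int() (an interior '-'); that case is excluded by Pre_ and the port
-- skips the element there.
def get_loop : Nat → List Int → List Int → Nat → List Int → List Int
  | 0, _, _, _, lista_palindrom => lista_palindrom
  | fuel + 1, lista1, lista2, pozitie, lista_palindrom =>
    if h : pozitie < lista1.length ∧ pozitie < lista2.length then
      match PySem.Int.ofChars? (PySem.Int.toChars lista1[pozitie] ++ PySem.Int.toChars lista2[pozitie]) with
      | none => get_loop fuel lista1 lista2 (pozitie + 1) lista_palindrom
      | some n =>
        if is_palindrom n then get_loop fuel lista1 lista2 (pozitie + 1) (lista_palindrom ++ [n])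
        else get_loop fuel lista1 lista2 (pozitie + 1) lista_palindrom
    else lista_palindrom

-- fuel lista1.length bounds the loop count (pozitie starts at 0 and increases each step)
def get_lista_palindroame (lista1 : List Int) (lista2 : List Int) : List Int :=
  get_loop lista1.length lista1 lista2 0 []

-- ===== PORT B =====
-- body of B's for-loop: n = int(str(a) + str(b)); s = str(n); append n iff s == s[::-1]
-- (ofChars? = none is Python's ValueError, excluded by Pre_; the port skips the element there)
def pal_step (acc : List Int) (p : Int × Int) : List Int :=
  match PySem.Int.ofChars? (PySem.Int.toChars p.1 ++ PySem.Int.toChars p.2) with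
  | none => acc
  | some n =>
    let s := PySem.Int.toChars n
    if s = s.reverse then acc ++ [n] else acc

def get_lista_palindroame_alt (lista1 : List Int) (lista2 : List Int) : List Int :=
  (lista1.zip lista2).foldl pal_step []

-- ===== PRECONDITION & SPEC =====
-- Pre_ excludes a negative element at a paired position: a negative lista2[i] makes Python's
-- int(str(a)+str(b)) raise ValueError, and a negative lista1[i] makes A's oglindit while-loop
-- run forever; on every other input A returns normally.
def Pre_get_lista_palindroame (lista1 : List Int) (lista2 : List Int) : Prop :=
  ∀ p ∈ lista1.zip lista2, 0 ≤ p.1 ∧ 0 ≤ p.2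
instance (lista1 : List Int) (lista2 : List Int) : Decidable (Pre_get_lista_palindroame lista1 lista2) := by unfold Pre_get_lista_palindroame; infer_instance

def pvWitness_get_lista_palindroame : List Int × List Int := ([1, 22, 0, 12, 5], [1, 2, 5, 21, 50])

def Spec_get_lista_palindroame (lista1 : List Int) (lista2 : List Int) (out : List Int) : Prop := out = get_lista_palindroame_alt lista1 lista2
instance (lista1 : List Int) (lista2 : List Int) (out : List Int) : Decidable (Spec_get_lista_palindroame lista1 lista2 out) := by unfold Spec_get_lista_palindroame; infer_instance

-- ===== CLAIM (what is proved, stated in full; the proofs are below) =====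
def Claim_equal_get_lista_palindroame : Prop := ∀ (lista1 : List Int) (lista2 : List Int), Dom_get_lista_palindroame lista1 lista2 → Pre_get_lista_palindroame lista1 lista2 → Spec_get_lista_palindroame lista1 lista2 (get_lista_palindroame lista1 lista2)

-- ===== LEMMAS AND PROOFS =====

-- `Nat.toDigits` (what PySem.Int.toChars computes for n ≥ 0) written through `Nat.digits`.
theorem toDigitsCore_eq_digits (f : Nat) : ∀ (n : Nat) (ds : List Char), 0 < n → n ≤ f →
    Nat.toDigitsCore 10 f n ds = ((Nat.digits 10 n).map Nat.digitChar).reverse ++ ds := by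
  induction f with
  | zero => intro n ds h1 h2; omega
  | succ f ih =>
    intro n ds h1 h2
    simp only [Nat.toDigitsCore]
    rw [Nat.digits_def' (by omega : (1:Nat) < 10) h1]
    by_cases hz : n / 10 = 0
    · simp [hz]
    · rw [if_neg hz, ih (n / 10) _ (by omega) (by omega)]
      rw [Nat.digits_def' (by omega : (1:Nat) < 10) (by omega)]
      simp

theorem toDigits_eq_digits (n : Nat) :
    Nat.toDigits 10 n = if n = 0 then ['0'] else ((Nat.digits 10 n).map Nat.digitChar).reverse := by
  by_cases h : n = 0
  · subst h; rfl
  · rw [if_neg h, Nat.toDigits, toDigitsCore_eq_digits (n+1) n [] (by omega) (by omega), List.append_nil]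

-- A's reversal loop computes the value of the reversed digit string.
theorem oglindit_go_eq : ∀ (fuel : Nat) (m : Nat), m < fuel → ∀ (a : Int),
    oglindit_go fuel (m : Int) a
      = a * 10 ^ (Nat.digits 10 m).length + (Nat.ofDigits 10 (Nat.digits 10 m).reverse : Nat) := by
  intro fuel
  induction fuel with
  | zero => intro m hm; omega
  | succ fuel ih =>
    intro m hm a
    rw [oglindit_go]
    by_cases h : 0 < m
    · rw [if_pos (by exact_mod_cast h)]
      have hf : PySem.Int.floordiv (m : Int) 10 = ((m / 10 : Nat) : Int) := by
        exact_mod_cast PySem.Int.floordiv_natCast m 10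
      have hm : PySem.Int.mod (m : Int) 10 = ((m % 10 : Nat) : Int) := by
        exact_mod_cast PySem.Int.mod_natCast m 10
      rw [hf, hm, ih (m / 10) (by omega)]
      rw [Nat.digits_def' (by omega : (1:Nat) < 10) h]
      simp only [List.reverse_cons, List.length_cons, Nat.ofDigits_append, Nat.ofDigits_cons,
        Nat.ofDigits_nil, List.length_reverse]
      push_cast
      ring
    · have : m = 0 := by omega
      subst this
      simp

-- base-10 representations of a fixed width are unique
theorem ofDigits_inj : ∀ (L1 L2 : List Nat), L1.length = L2.length →
    (∀ x ∈ L1, x < 10) → (∀ x ∈ L2, x < 10) →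
    Nat.ofDigits 10 L1 = Nat.ofDigits 10 L2 → L1 = L2 := by
  intro L1
  induction L1 with
  | nil => intro L2 h _ _ _; exact (List.length_eq_zero_iff.mp h.symm).symm ▸ rfl
  | cons a t ih =>
    intro L2 hlen h1 h2 hval
    cases L2 with
    | nil => simp at hlen
    | cons b t2 =>
      simp only [Nat.ofDigits_cons] at hval
      have ha : a < 10 := h1 a (by simp)
      have hb : b < 10 := h2 b (by simp)
      have hab : a = b ∧ Nat.ofDigits 10 t = Nat.ofDigits 10 t2 := by
        constructor <;> omega
      obtain ⟨hab1, hab2⟩ := hab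
      have := ih t2 (by simpa using hlen) (fun x hx => h1 x (by simp [hx]))
        (fun x hx => h2 x (by simp [hx])) hab2
      rw [hab1, this]

theorem digits_pal_iff (m : Nat)
    (h : Nat.ofDigits 10 (Nat.digits 10 m).reverse = m) :
    Nat.digits 10 m = (Nat.digits 10 m).reverse :=
  ofDigits_inj (Nat.digits 10 m) (Nat.digits 10 m).reverse (by simp)
    (fun x hx => Nat.digits_lt_base (by omega) hx)
    (fun x hx => Nat.digits_lt_base (by omega) (List.mem_reverse.mp hx))
    (by rw [Nat.ofDigits_digits, h])

theorem digitChar_toNat (d : Nat) (hd : d < 10) : (Nat.digitChar d).toNat = 48 + d := by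
  interval_cases d <;> rfl

theorem digitChar_inj {a b : Nat} (ha : a < 10) (hb : b < 10)
    (h : Nat.digitChar a = Nat.digitChar b) : a = b := by
  have := congrArg Char.toNat h
  rw [digitChar_toNat a ha, digitChar_toNat b hb] at this
  omega

theorem map_digitChar_inj : ∀ (L1 L2 : List Nat), (∀ x ∈ L1, x < 10) → (∀ x ∈ L2, x < 10) →
    L1.map Nat.digitChar = L2.map Nat.digitChar → L1 = L2 := by
  intro L1
  induction L1 with
  | nil => intro L2 _ _ h; cases L2 <;> simp_all
  | cons a t ih =>
    intro L2 h1 h2 h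
    cases L2 with
    | nil => simp_all
    | cons b t2 =>
      simp only [List.map_cons, List.cons.injEq] at h
      have := digitChar_inj (h1 a (by simp)) (h2 b (by simp)) h.1
      rw [this, ih t2 (fun x hx => h1 x (by simp [hx])) (fun x hx => h2 x (by simp [hx])) h.2]

theorem toChars_of_nonneg (n : Int) (hn : 0 ≤ n) :
    PySem.Int.toChars n = Nat.toDigits 10 n.toNat := by
  simp [PySem.Int.toChars, not_lt.mpr hn]

theorem is_palindrom_iff (m : Nat) :
    (is_palindrom (m : Int) = true) ↔ Nat.digits 10 m = (Nat.digits 10 m).reverse := by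
  have : is_palindrom (m : Int) = true ↔ (m : Int) = oglindit (m : Int) := by
    simp [is_palindrom]
  rw [this, oglindit, Int.toNat_natCast, oglindit_go_eq (m + 1) m (by omega) 0]
  simp only [zero_mul, zero_add]
  constructor
  · intro h
    exact digits_pal_iff m (by exact_mod_cast h.symm)
  · intro h
    rw [← h, Nat.ofDigits_digits]

-- the crux: A's arithmetic palindrome test agrees with B's string palindrome test for n ≥ 0
theorem pal_iff (n : Int) (hn : 0 ≤ n) :
    (is_palindrom n = true) ↔ PySem.Int.toChars n = (PySem.Int.toChars n).reverse := by
  obtain ⟨m, rfl⟩ : ∃ m : Nat, n = (m : Int) := ⟨n.toNat, by omega⟩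
  rw [toChars_of_nonneg _ hn, is_palindrom_iff]
  simp only [Int.toNat_natCast, toDigits_eq_digits]
  by_cases hm : m = 0
  · simp [hm]
  · rw [if_neg hm]
    have hdig : ∀ x ∈ Nat.digits 10 m, x < 10 := fun x hx => Nat.digits_lt_base (by omega) hx
    have hdigr : ∀ x ∈ (Nat.digits 10 m).reverse, x < 10 :=
      fun x hx => hdig x (List.mem_reverse.mp hx)
    rw [List.reverse_reverse]
    constructor
    · intro h
      rw [← List.map_reverse, ← h]
    · intro h
      rw [← List.map_reverse] at h
      exact map_digitChar_inj _ _ hdig hdigr h.symm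

-- c is an ASCII decimal digit
def isDig (c : Char) : Prop := 48 ≤ c.toNat ∧ c.toNat ≤ 57

theorem digitChar_mem (d : Nat) (hd : d < 10) : isDig (Nat.digitChar d) := by
  unfold isDig
  rw [digitChar_toNat d hd]
  omega

theorem toDigits_digits_mem (n : Nat) : ∀ c ∈ Nat.toDigits 10 n, isDig c := by
  rw [toDigits_eq_digits]
  by_cases h : n = 0
  · simp [h, isDig]
  · rw [if_neg h]
    intro c hc
    rw [List.mem_reverse, List.mem_map] at hc
    obtain ⟨d, hd, rfl⟩ := hc
    exact digitChar_mem d (Nat.digits_lt_base (by omega) hd)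

theorem toDigits_ne_nil (n : Nat) : Nat.toDigits 10 n ≠ [] := by
  rw [toDigits_eq_digits]
  by_cases h : n = 0
  · simp [h]
  · simp [h, Nat.digits_ne_nil_iff_ne_zero.mpr h]

theorem dropWhile_eq_self_of_none {α : Type} (p : α → Bool) (l : List α)
    (h : ∀ c ∈ l, ¬ p c = true) : List.dropWhile p l = l := by
  cases l with
  | nil => rfl
  | cons a t => rw [List.dropWhile_cons, if_neg (h a (by simp))]

theorem dig_not_space (c : Char) (h : isDig c) : ¬ PySem.Int.isIntSpace c = true := by
  intro hsp
  simp only [PySem.Int.isIntSpace, Bool.or_eq_true, decide_eq_true_eq] at hsp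
  rcases hsp with ((((hc|hc)|hc)|hc)|hc)|hc <;> (subst hc; exact absurd h (by unfold isDig; decide))

-- int() of a non-empty all-digit string is never negative
theorem parse_nonneg (cs : List Char) (hne : cs ≠ []) (hd : ∀ c ∈ cs, isDig c) :
    ∀ k, PySem.Int.ofChars? cs = some k → 0 ≤ k := by
  intro k hk
  rw [PySem.Int.ofChars?] at hk
  rw [dropWhile_eq_self_of_none _ cs (fun c hc => dig_not_space c (hd c hc))] at hk
  rw [dropWhile_eq_self_of_none _ cs.reverse
      (fun c hc => dig_not_space c (hd c (List.mem_reverse.mp hc))), List.reverse_reverse] at hk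
  cases hcs : cs with
  | nil => exact absurd hcs hne
  | cons c t =>
    subst hcs
    have hc : isDig c := hd c (by simp)
    split at hk
    · rename_i ds heq
      exfalso
      have : c = '-' := by injection heq
      subst this
      exact absurd hc (by unfold isDig; decide)
    · rename_i ds heq
      exfalso
      have : c = '+' := by injection heq
      subst this
      exact absurd hc (by unfold isDig; decide)
    · simp only [Option.map_eq_some_iff, bind, Option.bind_eq_some_iff] at hk
      obtain ⟨a, ⟨b, hb, hp⟩, rfl⟩ := hk
      simp only [pure, Option.some.injEq] at hp
      subst hp
      positivity

-- A's while loop from position poz is B's fold over the remaining zipped pairs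
theorem get_loop_eq (l1 l2 : List Int)
    (hpre : ∀ p ∈ l1.zip l2, 0 ≤ p.1 ∧ 0 ≤ p.2) :
    ∀ (fuel poz : Nat) (acc : List Int), l1.length - poz ≤ fuel →
      get_loop fuel l1 l2 poz acc = ((l1.drop poz).zip (l2.drop poz)).foldl pal_step acc := by
  intro fuel
  induction fuel with
  | zero =>
    intro poz acc hf
    rw [get_loop, List.drop_eq_nil_of_le (by omega), List.zip_nil_left, List.foldl_nil]
  | succ fuel ih =>
    intro poz acc hf
    rw [get_loop]
    by_cases h : poz < l1.length ∧ poz < l2.length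
    · obtain ⟨h1, h2⟩ := h
      rw [dif_pos ⟨h1, h2⟩]
      have hd1 : l1.drop poz = l1[poz] :: l1.drop (poz + 1) := List.drop_eq_getElem_cons h1
      have hd2 : l2.drop poz = l2[poz] :: l2.drop (poz + 1) := List.drop_eq_getElem_cons h2
      rw [hd1, hd2, List.zip_cons_cons, List.foldl_cons]
      have hmem : (l1[poz], l2[poz]) ∈ l1.zip l2 := by
        have hlen : poz < (l1.zip l2).length := by
          rw [List.length_zip]; omega
        have := List.getElem_zip (l := l1) (l' := l2) (h := hlen)
        rw [← this]
        exact List.getElem_mem hlen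
      obtain ⟨ha, hb⟩ := hpre _ hmem
      have hstep : pal_step acc (l1[poz], l2[poz])
          = match PySem.Int.ofChars? (PySem.Int.toChars l1[poz] ++ PySem.Int.toChars l2[poz]) with
            | none => acc
            | some n => if PySem.Int.toChars n = (PySem.Int.toChars n).reverse
                        then acc ++ [n] else acc := rfl
      cases hp : PySem.Int.ofChars? (PySem.Int.toChars l1[poz] ++ PySem.Int.toChars l2[poz]) with
      | none =>
        simp only [hstep, hp]
        exact ih (poz + 1) acc (by omega)
      | some n =>
        have hn : 0 ≤ n := by
          refine parse_nonneg _ ?_ ?_ n hp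
          · intro hcontra
            exact toDigits_ne_nil l1[poz].toNat
              (by simpa [toChars_of_nonneg _ ha] using List.append_eq_nil_iff.mp hcontra |>.1)
          · intro c hc
            rcases List.mem_append.mp hc with hc | hc
            · exact toDigits_digits_mem _ c (by rwa [toChars_of_nonneg _ ha] at hc)
            · exact toDigits_digits_mem _ c (by rwa [toChars_of_nonneg _ hb] at hc)
        simp only [hstep, hp]
        by_cases hq : PySem.Int.toChars n = (PySem.Int.toChars n).reverse
        · rw [if_pos ((pal_iff n hn).mpr hq), if_pos hq, ih (poz + 1) _ (by omega)]
        · rw [if_neg (by rw [pal_iff n hn]; exact hq), if_neg hq, ih (poz + 1) _ (by omega)]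
    · rw [dif_neg h]
      rcases not_and_or.mp h with h' | h'
      · rw [List.drop_eq_nil_of_le (by omega), List.zip_nil_left, List.foldl_nil]
      · rw [(l2.drop_eq_nil_of_le (by omega) : l2.drop poz = []), List.zip_nil_right,
          List.foldl_nil]

-- ===== VERDICT (by name: the statement is the Claim_ definition above) =====
theorem get_lista_palindroame_spec : Claim_equal_get_lista_palindroame := by
  intro l1 l2 _ hpre
  show get_lista_palindroame l1 l2 = get_lista_palindroame_alt l1 l2
  rw [get_lista_palindroame, get_lista_palindroame_alt,
    get_loop_eq l1 l2 hpre l1.length 0 [] (by omega)]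
  simp
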